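-- pv_equiv track=rewrite | github.com/taraaggoun/projet_mi | algorithmes/util/resolution.py | _add_id
-- ===== SOURCE A (Python) =====
-- def _add_id(mat):
-- 	nb_col = len(mat[0])
-- 	nb_lin = len(mat)
-- 	for i in range(nb_col):
-- 		mat.append([])
-- 		for j in range(nb_col):
-- 			if j == i:
-- 				mat[nb_lin + i].append(1)
-- 			else:
-- 				mat[nb_lin + i].append(0)
-- 	return mat
-- ===== SOURCE B (Python) =====
-- def _identity(n):
-- 	if n == 0:
-- 		return []
-- 	return [[1] + [0] * (n - 1)] + [[0] + row for row in _identity(n - 1)]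
--
-- def _add_id(mat):
-- 	mat.extend(_identity(len(mat[0])))
-- 	return mat
-- ===== Notes on version B (the rewrite author's own statement) =====
-- stated objective: alternative
-- what changed: B builds the whole identity block by structural recursion on the dimension -- identity(n) is [1,0,...,0] followed by identity(n-1) with a 0 prefixed to every row -- and extends mat with it in one step, instead of A's doubly nested index loops appending single elements to mat's last row.
import Mathlib
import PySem

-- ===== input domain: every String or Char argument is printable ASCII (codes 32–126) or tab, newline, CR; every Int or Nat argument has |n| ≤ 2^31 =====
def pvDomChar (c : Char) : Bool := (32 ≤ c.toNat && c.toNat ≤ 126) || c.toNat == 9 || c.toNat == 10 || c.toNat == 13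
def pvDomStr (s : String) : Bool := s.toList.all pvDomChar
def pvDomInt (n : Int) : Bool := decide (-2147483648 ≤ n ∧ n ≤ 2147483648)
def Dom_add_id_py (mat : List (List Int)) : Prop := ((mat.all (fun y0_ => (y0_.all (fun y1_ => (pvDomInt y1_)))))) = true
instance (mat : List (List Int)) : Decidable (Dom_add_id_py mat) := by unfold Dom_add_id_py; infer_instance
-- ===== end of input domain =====

-- B builds the identity block by structural recursion on the dimension and extends mat once
-- (objective: alternative decomposition). Both Pythons mutate mat in place to the same final
-- list; the theorems are about the return value.

-- ===== PORT A =====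
-- A: nb_col = len(mat[0]) (mat[0] raises on [], excluded by Pre_; headD [] is exact under Pre_),
-- nb_lin = len(mat); outer loop appends [] then the inner loop appends 1/0 to mat[nb_lin+i],
-- ported as getD/set at index nb_lin+i. range(n) with n : Nat ported as List.range n (exact).
def add_id_py (mat : List (List Int)) : List (List Int) :=
  let nb_col := (mat.headD []).length
  let nb_lin := mat.length
  (List.range nb_col).foldl (fun m i =>
    let m' := m ++ [([] : List Int)]
    (List.range nb_col).foldl (fun mm j =>
      mm.set (nb_lin + i) ((mm.getD (nb_lin + i) []) ++ [if j = i then (1 : Int) else 0])) m') mat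

-- ===== PORT B =====
-- B's helper _identity(n): recursion on n, first row [1]+[0]*(n-1), then 0 prefixed to each row.
def pvIdentity : Nat → List (List Int)
  | 0 => []
  | n + 1 => ((1 : Int) :: List.replicate n (0 : Int)) :: (pvIdentity n).map (fun r => (0 : Int) :: r)

-- B: mat.extend(_identity(len(mat[0]))); return mat
def add_id_py_alt (mat : List (List Int)) : List (List Int) :=
  mat ++ pvIdentity (mat.headD []).length

-- ===== PRECONDITION & SPEC =====
-- Pre_ excludes only the empty matrix, on which both A and B raise IndexError at mat[0].
def Pre_add_id_py (mat : List (List Int)) : Prop := mat ≠ []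
instance (mat : List (List Int)) : Decidable (Pre_add_id_py mat) := by unfold Pre_add_id_py; infer_instance
def pvWitness_add_id_py : List (List Int) := [[1, 2], [3, 4]]
def Spec_add_id_py (mat : List (List Int)) (out : List (List Int)) : Prop := out = add_id_py_alt mat
instance (mat : List (List Int)) (out : List (List Int)) : Decidable (Spec_add_id_py mat out) := by unfold Spec_add_id_py; infer_instance

-- ===== CLAIM (what is proved, stated in full; the proofs are below) =====
def Claim_equal_add_id_py : Prop := ∀ (mat : List (List Int)), Dom_add_id_py mat → Pre_add_id_py mat → Spec_add_id_py mat (add_id_py mat)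

-- ===== LEMMAS AND PROOFS =====

-- setting / reading the freshly appended last row
theorem pv_getD_last (prev : List (List Int)) (r : List Int) :
    (prev ++ [r]).getD prev.length [] = r := by
  simp [List.getD]

theorem pv_set_last (prev : List (List Int)) (r x : List Int) :
    (prev ++ [r]).set prev.length x = prev ++ [x] := by
  simp

-- A's inner loop, acting on the last row of prev ++ [r], appends f j for each j of l.
theorem pv_inner (f : Nat → Int) (l : List Nat) (prev : List (List Int)) (r : List Int) :
    l.foldl (fun mm j => mm.set prev.length ((mm.getD prev.length []) ++ [f j])) (prev ++ [r])
      = prev ++ [r ++ l.map f] := by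
  induction l generalizing r with
  | nil => simp
  | cons j t ih =>
      simp only [List.foldl_cons, pv_getD_last, pv_set_last, List.map_cons]
      rw [ih]
      simp

-- A's row i written as set on a zero row
theorem pv_row (n i : Nat) :
    (List.range n).map (fun j => if j = i then (1 : Int) else 0)
      = (List.replicate n (0 : Int)).set i 1 := by
  apply List.ext_getElem
  · simp
  · intro k h1 h2
    simp only [List.getElem_map, List.getElem_range, List.getElem_set,
      List.getElem_replicate]
    by_cases hk : i = k
    · simp [hk]
    · simp [hk]; omega

-- A's outer loop over the first m indices
theorem pv_outer (nb_col : Nat) (mat : List (List Int)) (m : Nat) :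
    (List.range m).foldl (fun mm i =>
        let m' := mm ++ [([] : List Int)]
        (List.range nb_col).foldl (fun mm2 j =>
          mm2.set (mat.length + i) ((mm2.getD (mat.length + i) []) ++ [if j = i then (1 : Int) else 0])) m') mat
      = mat ++ (List.range m).map (fun i => (List.replicate nb_col (0 : Int)).set i 1) := by
  induction m with
  | zero => simp
  | succ m ih =>
      rw [List.range_succ, List.foldl_append, ih, List.foldl_cons, List.foldl_nil]
      show (List.range nb_col).foldl _ _ = _
      have hlen : mat.length + m
          = (mat ++ (List.range m).map (fun i => (List.replicate nb_col (0 : Int)).set i 1)).length := by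
        simp
      rw [hlen, pv_inner, List.nil_append, pv_row]
      simp

-- B's recursive identity equals the row-by-row description
theorem pv_identity_eq (n : Nat) :
    pvIdentity n = (List.range n).map (fun i => (List.replicate n (0 : Int)).set i 1) := by
  induction n with
  | zero => simp [pvIdentity]
  | succ n ih =>
      rw [pvIdentity, ih, List.range_succ_eq_map, List.map_cons]
      simp only [List.map_map]
      refine congrArg₂ List.cons ?_ (List.map_congr_left ?_)
      · simp [List.replicate_succ]
      · intro i _
        simp [List.replicate_succ]

-- ===== VERDICT (by name: the statement is the Claim_ definition above) =====
theorem add_id_py_spec : Claim_equal_add_id_py := by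
  intro mat _ _
  unfold Spec_add_id_py add_id_py add_id_py_alt
  rw [pv_outer, pv_identity_eq]
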